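-- pv_equiv track=rewrite | github.com/Fondamenti18/fondamenti-di-programmazione | students/1812793/homework04/program01.py | calcola
-- ===== SOURCE A (Python) =====
-- def calcola(x,d,df,cont):
--     if cont in df:
--         df[cont]+=[x]
--     else:
--         df[cont]=[x]
--     cont+=1
--     for i in d[x]:
--         df=calcola(i,d,df,cont)
--     return df
-- ===== SOURCE B (Python) =====
-- def calcola(x, d, df, cont):
--     # Two-phase iterative rewrite: an explicit stack produces the (depth, node)
--     # pre-order sequence first, then a second pass appends it into df.
--     # Mutates and returns the same df, like the original.
--     stack = [(x, cont)]
--     order = []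
--     while stack:
--         n, c = stack.pop()
--         order.append((c, n))
--         for ch in reversed(d[n]):  # reversed so the leftmost child is popped first
--             stack.append((ch, c + 1))
--     for c, n in order:
--         if c in df:
--             df[c].append(n)
--         else:
--             df[c] = [n]
--     return df
-- ===== Notes on version B (the rewrite author's own statement) =====
-- stated objective: alternative
-- what changed: The recursive DFS that threads the dict through every call is replaced by a two-phase iterative version: an explicit stack first yields the (depth, node) pre-order sequence (children pushed reversed), then a separate pass appends that sequence into df.
import Mathlib
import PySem

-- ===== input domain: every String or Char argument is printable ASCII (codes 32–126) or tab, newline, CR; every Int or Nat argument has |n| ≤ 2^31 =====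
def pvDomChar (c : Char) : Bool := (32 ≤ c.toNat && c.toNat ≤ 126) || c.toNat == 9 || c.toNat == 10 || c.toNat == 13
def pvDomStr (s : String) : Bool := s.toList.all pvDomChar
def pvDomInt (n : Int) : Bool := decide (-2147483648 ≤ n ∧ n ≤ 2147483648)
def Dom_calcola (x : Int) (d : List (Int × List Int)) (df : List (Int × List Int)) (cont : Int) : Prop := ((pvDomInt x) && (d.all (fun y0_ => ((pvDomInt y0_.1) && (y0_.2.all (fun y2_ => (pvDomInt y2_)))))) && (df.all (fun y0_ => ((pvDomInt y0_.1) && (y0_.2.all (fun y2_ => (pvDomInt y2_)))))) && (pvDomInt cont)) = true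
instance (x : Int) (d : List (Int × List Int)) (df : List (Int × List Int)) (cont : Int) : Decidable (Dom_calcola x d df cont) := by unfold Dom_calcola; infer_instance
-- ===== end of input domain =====

-- B replaces A's recursive dict-threading DFS by a two-phase iterative version: an explicit
-- stack first produces the (depth, node) pre-order sequence, then a second pass appends it
-- into df (same return value; both A and B mutate the df dict they were given in Python).


-- ===== PORT A =====
-- d[x] (Python raises KeyError on a missing key; Pre_calcola excludes those inputs, so the
-- [] default is never reached on admitted inputs)
def pvGetCh (d : List (Int × List Int)) (x : Int) : List Int :=
  match d.find? (fun p => p.1 == x) with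
  | some p => p.2
  | none => []

-- A's 'if cont in df: df[cont]+=[x] else: df[cont]=[x]': append to the first entry with key
-- cont, keeping its position; a missing key is appended at the end (exact for a Python dict)
def pvAdd (df : List (Int × List Int)) (k : Int) (v : List Int) : List (Int × List Int) :=
  match df with
  | [] => [(k, v)]
  | p :: rest => if p.1 == k then (p.1, p.2 ++ v) :: rest else p :: pvAdd rest k v

-- A's recursion, made total by fuel; under Pre_calcola the traversal depth is ≤ d.length,
-- so fuel d.length + 1 is never exhausted on admitted inputs
def calcolaAux (d : List (Int × List Int)) : Nat → Int → List (Int × List Int) → Int → List (Int × List Int)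
  | 0, _, df, _ => df
  | f + 1, x, df, cont =>
      (pvGetCh d x).foldl (fun acc i => calcolaAux d f i acc (cont + 1)) (pvAdd df cont [x])

def calcola (x : Int) (d : List (Int × List Int)) (df : List (Int × List Int)) (cont : Int) : List (Int × List Int) :=
  calcolaAux d (d.length + 1) x df cont

-- ===== PORT B =====
-- d[n] for B, via first-match association lookup ([] default unreachable under Pre_calcola)
def bchildren (d : List (Int × List Int)) (n : Int) : List Int := (d.lookup n).getD []

-- phase 2 body: 'if c in df: df[c].append(n) else: df[c] = [n]'
def bupd : List (Int × List Int) → Int → Int → List (Int × List Int)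
  | [], _, _ => []
  | p :: rest, c, n => if p.1 == c then (c, p.2 ++ [n]) :: rest else p :: bupd rest c n

def bput (df : List (Int × List Int)) (c : Int) (n : Int) : List (Int × List Int) :=
  if df.any (fun p => p.1 == c) then bupd df c n else df ++ [(c, [n])]

-- phase 1: the while-loop over the explicit stack, accumulating the pre-order (depth, node)
-- sequence.  Python pushes reversed(d[n]) and pops from the end; prepending the children in
-- order is the same thing.  Each stack entry carries a depth fuel (a totality guard only:
-- the per-entry fuel d.length+1 is never exhausted under Pre_calcola), and the loop itself
-- is driven by a top-level fuel large enough for any input (proved in bloop_eq_plan).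
def bloop (d : List (Int × List Int)) : Nat → List (Int × Int × Nat) → List (Int × Int) → List (Int × Int)
  | 0, _, ord => ord
  | _ + 1, [], ord => ord
  | F + 1, (_, _, 0) :: st, ord => bloop d F st ord
  | F + 1, (n, c, f + 1) :: st, ord =>
      bloop d F (((bchildren d n).map (fun ch => (ch, c + 1, f))) ++ st) (ord ++ [(c, n)])

-- the largest child-list length in d, and the fuel budget Σ (bdeg+1)^f over a stack
def bdeg (d : List (Int × List Int)) : Nat := (d.map (fun p => p.2.length)).foldr max 0
def bneed (d : List (Int × List Int)) (st : List (Int × Int × Nat)) : Nat :=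
  (st.map (fun e => (bdeg d + 1) ^ e.2.2)).sum

def calcola_alt (x : Int) (d : List (Int × List Int)) (df : List (Int × List Int)) (cont : Int) : List (Int × List Int) :=
  (bloop d (bneed d [(x, cont, d.length + 1)]) [(x, cont, d.length + 1)] []).foldl
    (fun acc p => bput acc p.1 p.2) df

-- ===== PRECONDITION & SPEC =====
-- 'cont in df'
def pvHasKey (df : List (Int × List Int)) (k : Int) : Bool := df.any (fun p => p.1 == k)

-- bounded breadth-first crawl of the input graph from x: accumulates the seen nodes and the
-- current frontier, deduplicated; after one round more than d has keys the frontier is empty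
-- iff no cycle is reachable from x (a graph property of the input, not a run of either port)
def pvCrawl (d : List (Int × List Int)) : Nat → List Int × List Int → List Int × List Int
  | Nat.zero, p => p
  | Nat.succ n, (seen, frontier) =>
      pvCrawl d n (PySem.List.dedup (seen ++ frontier), PySem.List.dedup (frontier.flatMap (pvGetCh d)))

-- Pre_ excludes exactly the inputs on which the Python A does not return: those whose traversal
-- reaches a node that is not a key of d (A raises KeyError), and those with a cycle reachable
-- from x (A overflows the recursion stack; B loops forever).
def Pre_calcola (x : Int) (d : List (Int × List Int)) (df : List (Int × List Int)) (cont : Int) : Prop :=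
  (pvCrawl d d.length.succ ([], [x])).2 = [] ∧
  (∀ r ∈ (pvCrawl d d.length.succ ([], [x])).1, pvHasKey d r = true)

instance (x : Int) (d : List (Int × List Int)) (df : List (Int × List Int)) (cont : Int) : Decidable (Pre_calcola x d df cont) := by
  unfold Pre_calcola; infer_instance

def pvWitness_calcola : Int × (List (Int × List Int)) × (List (Int × List Int)) × Int :=
  (1, [(1, [2, 3]), (2, []), (3, [])], [(0, [7])], 0)

def Spec_calcola (x : Int) (d : List (Int × List Int)) (df : List (Int × List Int)) (cont : Int) (out : List (Int × List Int)) : Prop := out = calcola_alt x d df cont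
instance (x : Int) (d : List (Int × List Int)) (df : List (Int × List Int)) (cont : Int) (out : List (Int × List Int)) : Decidable (Spec_calcola x d df cont out) := by unfold Spec_calcola; infer_instance

-- ===== CLAIM (what is proved, stated in full; the proofs are below) =====
def Claim_equal_calcola : Prop := ∀ (x : Int) (d : List (Int × List Int)) (df : List (Int × List Int)) (cont : Int), Dom_calcola x d df cont → Pre_calcola x d df cont → Spec_calcola x d df cont (calcola x d df cont)

-- ===== LEMMAS AND PROOFS =====

-- the canonical (depth, node) pre-order plan both ports realise
def pvPlan (d : List (Int × List Int)) : Nat → Int → Int → List (Int × Int)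
  | 0, _, _ => []
  | f + 1, x, c => (c, x) :: (pvGetCh d x).flatMap (fun i => pvPlan d f i (c + 1))

theorem bchildren_eq (d : List (Int × List Int)) (n : Int) : bchildren d n = pvGetCh d n := by
  induction d with
  | nil => rfl
  | cons p rest ih =>
    by_cases h : n = p.1
    · have hb : (n == p.1) = true := by simpa using h
      have hb' : (p.1 == n) = true := by simpa using h.symm
      simp [bchildren, pvGetCh, List.lookup, List.find?, hb, hb']
    · have hb : (n == p.1) = false := by simpa using h
      have hb' : (p.1 == n) = false := by simpa using fun e => h e.symm
      simpa [bchildren, pvGetCh, List.lookup, List.find?, hb, hb'] using ih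

theorem bput_eq (df : List (Int × List Int)) (c n : Int) : pvAdd df c [n] = bput df c n := by
  induction df with
  | nil => simp [pvAdd, bput, bupd]
  | cons p rest ih =>
    by_cases h : p.1 == c
    · have : p.1 = c := by simpa using h
      simp [pvAdd, bput, bupd, h, this]
    · by_cases hr : rest.any (fun q => q.1 == c)
      · simp only [pvAdd, h, Bool.false_eq_true, if_false]
        simp only [bput, hr, List.any_cons, h, Bool.false_or, if_pos] at ih ⊢
        simp [bupd, h, ih]
      · simp only [pvAdd, h, Bool.false_eq_true, if_false]
        simp only [bput, hr, List.any_cons, h, Bool.false_or, Bool.false_eq_true, if_false] at ih ⊢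
        simp [ih]

-- A realises the plan: calcolaAux is a left fold of pvAdd over pvPlan
theorem aux_eq_plan (d : List (Int × List Int)) :
    ∀ (f : Nat) (x : Int) (df : List (Int × List Int)) (c : Int),
      calcolaAux d f x df c = (pvPlan d f x c).foldl (fun a p => pvAdd a p.1 [p.2]) df := by
  intro f
  induction f with
  | zero => intro x df c; rfl
  | succ f ih =>
    intro x df c
    show (pvGetCh d x).foldl (fun acc i => calcolaAux d f i acc (c + 1)) (pvAdd df c [x])
       = ((c, x) :: (pvGetCh d x).flatMap (fun i => pvPlan d f i (c + 1))).foldl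
           (fun a p => pvAdd a p.1 [p.2]) df
    simp only [List.foldl_cons]
    generalize pvAdd df c [x] = df0
    induction pvGetCh d x generalizing df0 with
    | nil => rfl
    | cons i rest ihL =>
      simp only [List.foldl_cons, List.flatMap_cons, List.foldl_append]
      rw [ih i df0 (c + 1), ihL]

theorem bdeg_bound (d : List (Int × List Int)) (n : Int) : (bchildren d n).length ≤ bdeg d := by
  induction d with
  | nil => simp [bchildren, List.lookup]
  | cons p rest ih =>
    by_cases h : n = p.1
    · have hb : (n == p.1) = true := by simpa using h
      simp only [bchildren, List.lookup, hb, Option.getD_some, bdeg, List.map_cons,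
        List.foldr_cons]
      exact le_max_left _ _
    · have hb : (n == p.1) = false := by simpa using h
      simp only [bchildren, List.lookup, hb] at *
      simp only [bdeg, List.map_cons, List.foldr_cons]
      exact le_trans ih (le_max_right _ _)

-- B's stack loop realises the plan, given any sufficient top-level fuel
theorem bloop_eq_plan (d : List (Int × List Int)) :
    ∀ (F : Nat) (st : List (Int × Int × Nat)) (ord : List (Int × Int)),
      bneed d st ≤ F →
      bloop d F st ord = ord ++ st.flatMap (fun e => pvPlan d e.2.2 e.1 e.2.1) := by
  intro F
  induction F with
  | zero =>
    intro st ord h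
    match st with
    | [] => simp [bloop]
    | e :: st' =>
      exfalso
      have : 0 < (bdeg d + 1) ^ e.2.2 := Nat.pow_pos (Nat.succ_pos _)
      simp only [bneed, List.map_cons, List.sum_cons, Nat.le_zero] at h
      omega
  | succ F ih =>
    intro st ord h
    match st with
    | [] => simp [bloop]
    | (n, c, 0) :: st' =>
      have h' : bneed d st' ≤ F := by
        simp only [bneed, List.map_cons, List.sum_cons, pow_zero] at h ⊢
        omega
      simp only [bloop, List.flatMap_cons]
      rw [ih st' ord h']
      rfl
    | (n, c, f + 1) :: st' =>
      have hlen : (bchildren d n).length ≤ bdeg d := bdeg_bound d n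
      have hsum : (((bchildren d n).map (fun ch => (ch, c + 1, f))).map
          (fun e => (bdeg d + 1) ^ e.2.2)).sum = (bchildren d n).length * (bdeg d + 1) ^ f := by
        rw [List.map_map]
        induction bchildren d n with
        | nil => simp
        | cons a l ihl => simp [ihl, Nat.succ_mul, Nat.add_comm]
      have hpos : 0 < (bdeg d + 1) ^ f := Nat.pow_pos (Nat.succ_pos _)
      have h' : bneed d (((bchildren d n).map (fun ch => (ch, c + 1, f))) ++ st') ≤ F := by
        have hold : (bdeg d + 1) ^ (f + 1) + bneed d st' ≤ F + 1 := by
          simpa [bneed] using h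
        have hexp : (bdeg d + 1) ^ (f + 1) = (bdeg d) * (bdeg d + 1) ^ f + (bdeg d + 1) ^ f := by
          rw [pow_succ]; ring
        have hle : (bchildren d n).length * (bdeg d + 1) ^ f ≤ (bdeg d) * (bdeg d + 1) ^ f :=
          Nat.mul_le_mul_right _ hlen
        simp only [bneed, List.map_append, List.sum_append] at *
        rw [hsum]
        omega
      simp only [bloop]
      rw [ih _ _ h']
      simp only [List.flatMap_append, List.flatMap_cons, List.flatMap_map]
      show ord ++ [(c, n)] ++ _ = ord ++ (pvPlan d (f + 1) n c ++ _)
      simp [pvPlan, bchildren_eq]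

-- folding pvAdd and folding bput over the same plan agree
theorem foldl_put_eq (L : List (Int × Int)) :
    ∀ df : List (Int × List Int),
      L.foldl (fun a p => pvAdd a p.1 [p.2]) df = L.foldl (fun a p => bput a p.1 p.2) df := by
  induction L with
  | nil => intro df; rfl
  | cons p rest ih => intro df; rw [List.foldl_cons, List.foldl_cons, bput_eq, ih]

-- ===== VERDICT (by name: the statement is the Claim_ definition above) =====
theorem calcola_spec : Claim_equal_calcola := by
  intro x d df cont _ _
  show calcola x d df cont = calcola_alt x d df cont
  rw [calcola, calcola_alt, aux_eq_plan,
      bloop_eq_plan d _ [(x, cont, d.length + 1)] [] (le_refl _), foldl_put_eq]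
  simp
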